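-- pv_equiv track=rewrite | github.com/sqrta/QSynth | src/Specification.py | OutputIndex
-- ===== SOURCE A (Python) =====
-- def OutputIndex(lenList):
--     start = 0
--     interval = []
--     for length in lenList:
--         end = start + length -1
--         interval.append((start, end))
--         start += length
--     return interval
-- ===== SOURCE B (Python) =====
-- def OutputIndex(lenList):
--     # prefix-sum table, then pair shifted starts with ends via zip
--     cum = []
--     t = 0
--     for x in lenList:
--         t += x
--         cum.append(t)
--     starts = [0] + cum[:-1]
--     ends = [c - 1 for c in cum]
--     return list(zip(starts, ends))
-- ===== Notes on version B (the rewrite author's own statement) =====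
-- stated objective: alternative
-- what changed: Replaces the single running-accumulator loop that appends (start,end) pairs with a prefix-sum table cum followed by a separate pairing pass: starts are zero followed by cum without its last element, ends are each cum entry minus one, zipped together.
import Mathlib
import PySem

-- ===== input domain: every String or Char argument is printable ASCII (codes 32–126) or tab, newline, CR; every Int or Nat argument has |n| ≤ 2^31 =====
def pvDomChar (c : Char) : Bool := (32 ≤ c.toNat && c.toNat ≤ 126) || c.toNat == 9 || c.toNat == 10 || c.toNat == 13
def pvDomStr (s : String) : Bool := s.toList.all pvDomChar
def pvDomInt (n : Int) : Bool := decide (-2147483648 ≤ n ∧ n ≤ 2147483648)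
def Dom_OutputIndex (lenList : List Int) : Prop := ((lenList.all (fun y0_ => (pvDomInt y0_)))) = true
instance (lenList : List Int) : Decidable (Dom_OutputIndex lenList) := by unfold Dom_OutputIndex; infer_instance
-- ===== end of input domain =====

-- B replaces A's running-accumulator append loop by a prefix-sum table plus a zip pairing pass (alternative decomposition, same cost).


-- ===== PORT A =====
-- loop: for length in lenList: end = start+length-1; interval.append((start,end)); start += length
def OutputIndexLoop (start : Int) (interval : List (Int × Int)) : List Int → List (Int × Int)
  | [] => interval
  | length :: rest => OutputIndexLoop (start + length) (interval ++ [(start, start + length - 1)]) rest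

def OutputIndex (lenList : List Int) : List (Int × Int) :=
  OutputIndexLoop 0 [] lenList

-- ===== PORT B =====
-- cum: prefix sums of lenList (Source B's first loop)
def OutputIndexCum (t : Int) : List Int → List Int
  | [] => []
  | x :: rest => (t + x) :: OutputIndexCum (t + x) rest

def OutputIndex_alt (lenList : List Int) : List (Int × Int) :=
  let cum := OutputIndexCum 0 lenList
  let starts := 0 :: cum.dropLast      -- [0] + cum[:-1]
  let ends := cum.map (fun c => c - 1) -- [c - 1 for c in cum]
  starts.zip ends                      -- list(zip(starts, ends)), zip truncates

-- ===== PRECONDITION & SPEC =====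
def Spec_OutputIndex (lenList : List Int) (out : List (Int × Int)) : Prop := out = OutputIndex_alt lenList
instance (lenList : List Int) (out : List (Int × Int)) : Decidable (Spec_OutputIndex lenList out) := by unfold Spec_OutputIndex; infer_instance

-- ===== CLAIM (what is proved, stated in full; the proofs are below) =====
def Claim_equal_OutputIndex : Prop := ∀ (lenList : List Int), Dom_OutputIndex lenList → Spec_OutputIndex lenList (OutputIndex lenList)

-- ===== LEMMAS AND PROOFS =====

-- closed recursive form shared by both proofs
def pairsFrom (s : Int) : List Int → List (Int × Int)
  | [] => []
  | l :: ls => (s, s + l - 1) :: pairsFrom (s + l) ls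

theorem loopA_eq (ls : List Int) : ∀ (s : Int) (acc : List (Int × Int)),
    OutputIndexLoop s acc ls = acc ++ pairsFrom s ls := by
  induction ls with
  | nil => intro s acc; simp [OutputIndexLoop, pairsFrom]
  | cons l ls ih =>
    intro s acc
    simp [OutputIndexLoop, pairsFrom, ih]

theorem alt_eq (ls : List Int) : ∀ (s : Int),
    (s :: (OutputIndexCum s ls).dropLast).zip ((OutputIndexCum s ls).map (fun c => c - 1))
      = pairsFrom s ls := by
  induction ls with
  | nil => intro s; simp [OutputIndexCum, pairsFrom]
  | cons l ls ih =>
    intro s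
    cases ls with
    | nil => simp [OutputIndexCum, pairsFrom]
    | cons a rest =>
      have h := ih (s + l)
      simp only [OutputIndexCum] at h ⊢
      simp only [List.dropLast_cons₂, List.map_cons, List.zip_cons_cons, pairsFrom]
      simp only [List.map_cons, List.zip_cons_cons, pairsFrom, List.cons.injEq, true_and] at h
      simp [h]

theorem OutputIndex_spec : Claim_equal_OutputIndex := by
  intro lenList _
  unfold Spec_OutputIndex OutputIndex OutputIndex_alt
  rw [loopA_eq, ← alt_eq]
  simp
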